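-- pv_equiv track=rewrite | github.com/laudaturoxana-cpu/attungo | backend/services/zpd_tracker.py | get_zpd_summary
-- ===== SOURCE A (Python) =====
-- from typing import Any
--
-- def get_zpd_summary(zpd: dict[str, Any], subject: str) -> dict[str, list[str]]:
--     """Returnează un rezumat al ZPD per materie pentru system prompt."""
--     subject_zpd = zpd.get(subject, {})
--
--     return {
--         "can_do": [c for c, d in subject_zpd.items() if d.get("status") == "can_do_alone"],
--         "with_help": [c for c, d in subject_zpd.items() if d.get("status") == "with_help"],
--         "not_yet": [c for c, d in subject_zpd.items() if d.get("status") == "not_yet"],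
--         "mastered": [c for c, d in subject_zpd.items() if d.get("status") == "mastered"],
--     }
-- ===== SOURCE B (Python) =====
-- def get_zpd_summary(zpd, subject):
--     """Returneaza un rezumat al ZPD per materie pentru system prompt."""
--     subject_zpd = zpd.get(subject, {})
--     mapping = {
--         "can_do_alone": "can_do",
--         "with_help": "with_help",
--         "not_yet": "not_yet",
--         "mastered": "mastered",
--     }
--     result = {"can_do": [], "with_help": [], "not_yet": [], "mastered": []}
--     for c, d in subject_zpd.items():
--         key = mapping.get(d.get("status"))
--         if key is not None:
--             result[key].append(c)
--     return result
-- ===== Notes on version B (the rewrite author's own statement) =====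
-- stated objective: simpler
-- what changed: Replaces four separate filtering scans over subject_zpd (one per status) with a single bucketing pass that appends each concept to its status bucket via a status-to-key mapping.
import Mathlib
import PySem

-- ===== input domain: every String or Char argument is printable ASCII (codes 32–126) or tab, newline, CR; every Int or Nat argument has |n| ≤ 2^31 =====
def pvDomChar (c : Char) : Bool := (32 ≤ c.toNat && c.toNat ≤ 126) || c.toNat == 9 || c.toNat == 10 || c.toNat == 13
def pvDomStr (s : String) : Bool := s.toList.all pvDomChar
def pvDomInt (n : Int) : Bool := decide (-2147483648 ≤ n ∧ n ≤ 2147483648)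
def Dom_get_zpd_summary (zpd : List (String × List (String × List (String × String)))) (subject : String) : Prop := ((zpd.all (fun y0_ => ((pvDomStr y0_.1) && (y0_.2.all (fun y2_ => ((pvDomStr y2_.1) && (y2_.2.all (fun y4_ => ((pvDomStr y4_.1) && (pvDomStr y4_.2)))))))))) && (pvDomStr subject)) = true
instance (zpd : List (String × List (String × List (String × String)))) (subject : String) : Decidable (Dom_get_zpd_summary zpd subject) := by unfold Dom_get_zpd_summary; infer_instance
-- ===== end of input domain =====

-- B replaces A's four separate filtering scans with one bucketing pass (simpler: one loop, one lookup per item).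

-- ===== PORT A =====
def get_zpd_summary (zpd : List (String × List (String × List (String × String)))) (subject : String) : List (String × List String) :=
  let subject_zpd := (PySem.Dict.mk zpd).getD subject []
  [("can_do", (subject_zpd.filter (fun cd => (PySem.Dict.mk cd.2).get? "status" == some "can_do_alone")).map (·.1)),
   ("with_help", (subject_zpd.filter (fun cd => (PySem.Dict.mk cd.2).get? "status" == some "with_help")).map (·.1)),
   ("not_yet", (subject_zpd.filter (fun cd => (PySem.Dict.mk cd.2).get? "status" == some "not_yet")).map (·.1)),
   ("mastered", (subject_zpd.filter (fun cd => (PySem.Dict.mk cd.2).get? "status" == some "mastered")).map (·.1))]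

-- ===== PORT B =====
-- the literal dict `mapping` of Source B
def pvMapping : PySem.Dict String String :=
  PySem.Dict.mk [("can_do_alone", "can_do"), ("with_help", "with_help"),
                 ("not_yet", "not_yet"), ("mastered", "mastered")]

-- one iteration of Source B's loop body: key = mapping.get(d.get("status")); if key is not None: result[key].append(c)
def pvStep (res : PySem.Dict String (List String)) (cd : String × List (String × String)) :
    PySem.Dict String (List String) :=
  match (match (PySem.Dict.mk cd.2).get? "status" with
         | some s => pvMapping.get? s
         | none => none) with
  | some k => res.modify k [] (· ++ [cd.1])
  | none => res

def get_zpd_summary_alt (zpd : List (String × List (String × List (String × String)))) (subject : String) : List (String × List String) :=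
  let subject_zpd := (PySem.Dict.mk zpd).getD subject []
  let result := subject_zpd.foldl pvStep
    (PySem.Dict.mk [("can_do", []), ("with_help", []), ("not_yet", []), ("mastered", [])])
  result.items

-- ===== PRECONDITION & SPEC =====
def Spec_get_zpd_summary (zpd : List (String × List (String × List (String × String)))) (subject : String) (out : List (String × List String)) : Prop := out = get_zpd_summary_alt zpd subject
instance (zpd : List (String × List (String × List (String × String)))) (subject : String) (out : List (String × List String)) : Decidable (Spec_get_zpd_summary zpd subject out) := by unfold Spec_get_zpd_summary; infer_instance

-- ===== CLAIM (what is proved, stated in full; the proofs are below) =====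
def Claim_equal_get_zpd_summary : Prop := ∀ (zpd : List (String × List (String × List (String × String)))) (subject : String), Dom_get_zpd_summary zpd subject → Spec_get_zpd_summary zpd subject (get_zpd_summary zpd subject)

-- ===== LEMMAS AND PROOFS =====

-- the mapped key of one item (abbreviation used only in the proofs)
def pvKeyOf (cd : String × List (String × String)) : Option String :=
  match (PySem.Dict.mk cd.2).get? "status" with
  | some s => pvMapping.get? s
  | none => none

theorem pvMapping_val (s k : String) (h : pvMapping.get? s = some k) :
    k = "can_do" ∨ k = "with_help" ∨ k = "not_yet" ∨ k = "mastered" := by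
  simp only [pvMapping, PySem.Dict.get?_mk_cons,
    show ∀ t, (PySem.Dict.mk ([] : List (String × String))).get? t = none from fun _ => rfl] at h
  split_ifs at h <;> simp_all

theorem pvKeys_fold (l : List (String × List (String × String)))
    (res : PySem.Dict String (List String))
    (h : res.keys = ["can_do", "with_help", "not_yet", "mastered"]) :
    (l.foldl pvStep res).keys = ["can_do", "with_help", "not_yet", "mastered"] := by
  induction l generalizing res with
  | nil => exact h
  | cons p l ih =>
    refine ih _ ?_
    unfold pvStep
    cases hk : (match (PySem.Dict.mk p.2).get? "status" with
                | some s => pvMapping.get? s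
                | none => none) with
    | none => simpa using h
    | some k =>
      have hkmem : k = "can_do" ∨ k = "with_help" ∨ k = "not_yet" ∨ k = "mastered" := by
        cases hs : (PySem.Dict.mk p.2).get? "status" with
        | none => simp [hs] at hk
        | some s => exact pvMapping_val s k (by simpa [hs] using hk)
      have hc : res.contains k = true := by
        rw [PySem.Dict.contains_eq_decide_mem_keys, h]
        rcases hkmem with h1 | h1 | h1 | h1 <;> simp [h1]
      simp only [PySem.Dict.keys_modify]
      rw [PySem.Dict.keys_insert_of_contains _ _ hc]
      exact h

theorem pvGetD_fold (l : List (String × List (String × String)))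
    (res : PySem.Dict String (List String)) (c : String) :
    (l.foldl pvStep res).getD c [] =
      res.getD c [] ++ (l.filter (fun p => pvKeyOf p == some c)).map (·.1) := by
  induction l generalizing res with
  | nil => simp
  | cons p l ih =>
    rw [List.foldl_cons, ih]
    unfold pvStep
    cases hk : (match (PySem.Dict.mk p.2).get? "status" with
                | some s => pvMapping.get? s
                | none => none) with
    | none => simp [pvKeyOf, hk]
    | some k =>
      by_cases hck : c = k
      · subst hck
        simp [pvKeyOf, hk, PySem.Dict.getD_modify_self]
      · simp [pvKeyOf, hk, PySem.Dict.getD_modify, hck,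
              (by simpa using Ne.symm hck : (k == c) = false)]

theorem pvKeyOf_eq (p : String × List (String × String)) (t c : String)
    (hm : pvMapping.get? t = some c)
    (hinj : ∀ s, pvMapping.get? s = some c → s = t) :
    (pvKeyOf p == some c) = ((PySem.Dict.mk p.2).get? "status" == some t) := by
  unfold pvKeyOf
  cases hs : (PySem.Dict.mk p.2).get? "status" with
  | none => simp
  | some s =>
    by_cases h : s = t
    · subst h; simp [hm]
    · have : pvMapping.get? s ≠ some c := fun hc => h (hinj s hc)
      simp [this, h]

-- ===== VERDICT (by name: the statement is the Claim_ definition above) =====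
theorem get_zpd_summary_spec : Claim_equal_get_zpd_summary := by
  intro zpd subject _
  unfold Spec_get_zpd_summary get_zpd_summary get_zpd_summary_alt
  set l := (PySem.Dict.mk zpd).getD subject [] with hl
  have hkeys := pvKeys_fold l (PySem.Dict.mk [("can_do", []), ("with_help", []), ("not_yet", []), ("mastered", [])]) (by decide)
  have hnd : (l.foldl pvStep (PySem.Dict.mk [("can_do", []), ("with_help", []), ("not_yet", []), ("mastered", [])])).keys.Nodup := by
    rw [hkeys]; decide
  rw [PySem.Dict.items_eq_map_keys _ hnd ([] : List String), hkeys]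
  simp only [List.map_cons, List.map_nil, pvGetD_fold]
  have e1 := pvKeyOf_eq (t := "can_do_alone") (c := "can_do") (hm := by decide)
    (hinj := by
      intro s h
      simp only [pvMapping, PySem.Dict.get?_mk_cons,
        show ∀ t, (PySem.Dict.mk ([] : List (String × String))).get? t = none from fun _ => rfl] at h
      split_ifs at h <;> simp_all)
  have e2 := pvKeyOf_eq (t := "with_help") (c := "with_help") (hm := by decide)
    (hinj := by
      intro s h
      simp only [pvMapping, PySem.Dict.get?_mk_cons,
        show ∀ t, (PySem.Dict.mk ([] : List (String × String))).get? t = none from fun _ => rfl] at h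
      split_ifs at h <;> simp_all)
  have e3 := pvKeyOf_eq (t := "not_yet") (c := "not_yet") (hm := by decide)
    (hinj := by
      intro s h
      simp only [pvMapping, PySem.Dict.get?_mk_cons,
        show ∀ t, (PySem.Dict.mk ([] : List (String × String))).get? t = none from fun _ => rfl] at h
      split_ifs at h <;> simp_all)
  have e4 := pvKeyOf_eq (t := "mastered") (c := "mastered") (hm := by decide)
    (hinj := by
      intro s h
      simp only [pvMapping, PySem.Dict.get?_mk_cons,
        show ∀ t, (PySem.Dict.mk ([] : List (String × String))).get? t = none from fun _ => rfl] at h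
      split_ifs at h <;> simp_all)
  simp only [List.filter_congr (fun p _ => e1 p), List.filter_congr (fun p _ => e2 p),
             List.filter_congr (fun p _ => e3 p), List.filter_congr (fun p _ => e4 p)]
  simp
  exact ⟨by decide, by decide, by decide, by decide⟩
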